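-- pv_equiv track=rewrite | github.com/Tony363/sim-pencil-paper-game | thegame.py | check_triangle
-- ===== SOURCE A (Python) =====
-- def check_triangle(player_lines):
--     #this function will check player lines
--     #if the the move form a triangle of different character the game will continue
--     #if the move form a triangle of with a unique character the it will return true
--     #it will be called by take_turn() then return the loser
--     if not player_lines:
--         return False
--
--     last_line = player_lines[-1]
--     other_lines = player_lines[:-1]
--     dot1, dot2 = last_line
--     for i in range(1,7):
--         if ((dot1, i) in other_lines or (i, dot1) in other_lines) and  ((dot2, i) in other_lines or (i, dot2) in other_lines):
--             return True
-- ===== SOURCE B (Python) =====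
-- def check_triangle(player_lines):
--     if not player_lines:
--         return False
--     dot1, dot2 = player_lines[-1]
--     n1, n2 = set(), set()
--     for a, b in player_lines[:-1]:
--         if a == dot1:
--             n1.add(b)
--         if b == dot1:
--             n1.add(a)
--         if a == dot2:
--             n2.add(b)
--         if b == dot2:
--             n2.add(a)
--     if n1 & n2 & set(range(1, 7)):
--         return True
-- ===== Notes on version B (the rewrite author's own statement) =====
-- stated objective: idiomatic
-- what changed: B scans other_lines once building the neighbor sets of the last line's two endpoints, then tests whether they share a vertex in 1..6, instead of A's loop over i=1..6 with four membership scans of other_lines per iteration.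
import Mathlib
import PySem

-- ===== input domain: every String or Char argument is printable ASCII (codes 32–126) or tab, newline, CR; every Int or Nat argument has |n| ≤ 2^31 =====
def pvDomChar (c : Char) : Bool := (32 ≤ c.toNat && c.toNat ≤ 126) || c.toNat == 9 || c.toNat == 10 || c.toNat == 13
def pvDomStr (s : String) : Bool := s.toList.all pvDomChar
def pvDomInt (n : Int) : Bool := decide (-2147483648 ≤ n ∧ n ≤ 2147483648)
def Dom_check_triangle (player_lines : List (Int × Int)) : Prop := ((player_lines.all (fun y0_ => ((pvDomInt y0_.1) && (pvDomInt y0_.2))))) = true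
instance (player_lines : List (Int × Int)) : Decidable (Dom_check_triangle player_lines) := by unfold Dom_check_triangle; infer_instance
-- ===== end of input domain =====

-- B builds the two neighbor sets of the last line's endpoints in one scan and tests for a
-- shared vertex in 1..6, instead of A's loop over i=1..6 with four list scans per iteration.


-- ===== PORT A =====
-- literal port: empty → False; else scan i = 1..6, four `in other_lines` tests, return True
-- on the first hit; fall off the loop → None
def check_triangle (player_lines : List (Int × Int)) : Option Bool :=
  if player_lines = [] then some false
  else
    match PySem.List.pyGet? player_lines (-1) with
    | none => none  -- unreachable: player_lines ≠ []
    | some (dot1, dot2) =>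
      let other_lines := PySem.List.slice player_lines none (some (-1))
      match (PySem.List.pyRange 1 7 1).find? (fun i =>
          (other_lines.contains (dot1, i) || other_lines.contains (i, dot1)) &&
          (other_lines.contains (dot2, i) || other_lines.contains (i, dot2))) with
      | some _ => some true
      | none => none

-- ===== PORT B =====
-- one step of B's loop body: the four conditional set-adds
def triStep (dot1 dot2 : Int) (ns : PySem.Set Int × PySem.Set Int) (ab : Int × Int) :
    PySem.Set Int × PySem.Set Int :=
  let n1 := if ab.1 = dot1 then PySem.Set.add ns.1 ab.2 else ns.1
  let n1 := if ab.2 = dot1 then PySem.Set.add n1 ab.1 else n1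
  let n2 := if ab.1 = dot2 then PySem.Set.add ns.2 ab.2 else ns.2
  let n2 := if ab.2 = dot2 then PySem.Set.add n2 ab.1 else n2
  (n1, n2)

def check_triangle_alt (player_lines : List (Int × Int)) : Option Bool :=
  if player_lines = [] then some false
  else
    match PySem.List.pyGet? player_lines (-1) with
    | none => none  -- unreachable: player_lines ≠ []
    | some (dot1, dot2) =>
      let other := PySem.List.slice player_lines none (some (-1))
      let ns := other.foldl (triStep dot1 dot2) (PySem.Set.empty, PySem.Set.empty)
      let common := PySem.Set.inter (PySem.Set.inter ns.1 ns.2)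
        (PySem.Set.ofList (PySem.List.pyRange 1 7 1))
      if common = [] then none else some true

-- ===== PRECONDITION & SPEC =====
def Spec_check_triangle (player_lines : List (Int × Int)) (out : Option Bool) : Prop := out = check_triangle_alt player_lines
instance (player_lines : List (Int × Int)) (out : Option Bool) : Decidable (Spec_check_triangle player_lines out) := by unfold Spec_check_triangle; infer_instance

-- ===== CLAIM (what is proved, stated in full; the proofs are below) =====
def Claim_equal_check_triangle : Prop := ∀ (player_lines : List (Int × Int)), Dom_check_triangle player_lines → Spec_check_triangle player_lines (check_triangle player_lines)

-- ===== LEMMAS AND PROOFS =====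

theorem mem_triStep_fold_fst (d1 d2 : Int) (o : List (Int × Int))
    (s : PySem.Set Int × PySem.Set Int) (x : Int) :
    x ∈ (o.foldl (triStep d1 d2) s).1 ↔ x ∈ s.1 ∨ (d1, x) ∈ o ∨ (x, d1) ∈ o := by
  induction o generalizing s with
  | nil => simp
  | cons p o ih =>
    obtain ⟨a, b⟩ := p
    simp only [List.foldl_cons, ih, triStep, List.mem_cons, Prod.mk.injEq]
    split_ifs with h1 h2 h2 <;> simp_all [PySem.Set.mem_add] <;> tauto

theorem mem_triStep_fold_snd (d1 d2 : Int) (o : List (Int × Int))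
    (s : PySem.Set Int × PySem.Set Int) (x : Int) :
    x ∈ (o.foldl (triStep d1 d2) s).2 ↔ x ∈ s.2 ∨ (d2, x) ∈ o ∨ (x, d2) ∈ o := by
  induction o generalizing s with
  | nil => simp
  | cons p o ih =>
    obtain ⟨a, b⟩ := p
    simp only [List.foldl_cons, ih, triStep, List.mem_cons, Prod.mk.injEq]
    split_ifs with h1 h2 h2 <;> simp_all [PySem.Set.mem_add] <;> tauto

-- membership in B's final intersection, characterised over the raw list
theorem tri_mem_common (d1 d2 x : Int) (o : List (Int × Int)) :
    x ∈ PySem.Set.inter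
        (PySem.Set.inter
          (o.foldl (triStep d1 d2) (PySem.Set.empty, PySem.Set.empty)).1
          (o.foldl (triStep d1 d2) (PySem.Set.empty, PySem.Set.empty)).2)
        (PySem.Set.ofList (PySem.List.pyRange 1 7 1))
    ↔ ((((d1, x) ∈ o ∨ (x, d1) ∈ o) ∧ ((d2, x) ∈ o ∨ (x, d2) ∈ o)) ∧ (1 ≤ x ∧ x < 7)) := by
  simp [PySem.Set.inter, List.mem_filter, mem_triStep_fold_fst, mem_triStep_fold_snd,
    PySem.Set.empty, PySem.Set.mem_ofList]
  tauto

-- A's loop predicate, as a proposition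
theorem tri_pred_iff (d1 d2 x : Int) (o : List (Int × Int)) :
    ((o.contains (d1, x) || o.contains (x, d1)) &&
     (o.contains (d2, x) || o.contains (x, d2))) = true
    ↔ ((d1, x) ∈ o ∨ (x, d1) ∈ o) ∧ ((d2, x) ∈ o ∨ (x, d2) ∈ o) := by
  simp

-- A finds no vertex 1..6 iff B's intersection is empty
theorem tri_none_iff (d1 d2 : Int) (o : List (Int × Int)) :
    ((PySem.List.pyRange 1 7 1).find? (fun i =>
        (o.contains (d1, i) || o.contains (i, d1)) &&
        (o.contains (d2, i) || o.contains (i, d2))) = none)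
    ↔ (PySem.Set.inter
        (PySem.Set.inter
          (o.foldl (triStep d1 d2) (PySem.Set.empty, PySem.Set.empty)).1
          (o.foldl (triStep d1 d2) (PySem.Set.empty, PySem.Set.empty)).2)
        (PySem.Set.ofList (PySem.List.pyRange 1 7 1)) = []) := by
  rw [List.find?_eq_none, List.eq_nil_iff_forall_not_mem]
  constructor
  · intro h x hx
    rw [tri_mem_common] at hx
    exact h x (by simp [PySem.List.mem_pyRange_one]; omega)
      ((tri_pred_iff d1 d2 x o).mpr hx.1)
  · intro h x hx hp
    apply h x
    rw [tri_mem_common]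
    refine ⟨(tri_pred_iff d1 d2 x o).mp hp, ?_⟩
    simpa [PySem.List.mem_pyRange_one] using hx

-- ===== VERDICT (by name: the statement is the Claim_ definition above) =====
theorem check_triangle_spec : Claim_equal_check_triangle := by
  intro pl _
  show check_triangle pl = check_triangle_alt pl
  unfold check_triangle check_triangle_alt
  by_cases hpl : pl = []
  · simp [hpl]
  · rw [if_neg hpl, if_neg hpl]
    cases hlast : PySem.List.pyGet? pl (-1) with
    | none => rfl
    | some p =>
      obtain ⟨d1, d2⟩ := p
      dsimp only
      cases hf : (PySem.List.pyRange 1 7 1).find? (fun i =>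
          ((PySem.List.slice pl none (some (-1))).contains (d1, i) ||
           (PySem.List.slice pl none (some (-1))).contains (i, d1)) &&
          ((PySem.List.slice pl none (some (-1))).contains (d2, i) ||
           (PySem.List.slice pl none (some (-1))).contains (i, d2))) with
      | none =>
        rw [if_pos ((tri_none_iff d1 d2 _).mp hf)]
      | some j =>
        have hne : ¬ (PySem.Set.inter
            (PySem.Set.inter
              ((PySem.List.slice pl none (some (-1))).foldl (triStep d1 d2)
                (PySem.Set.empty, PySem.Set.empty)).1
              ((PySem.List.slice pl none (some (-1))).foldl (triStep d1 d2)
                (PySem.Set.empty, PySem.Set.empty)).2)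
            (PySem.Set.ofList (PySem.List.pyRange 1 7 1)) = []) := by
          intro hc
          rw [(tri_none_iff d1 d2 _).mpr hc] at hf
          simp at hf
        rw [if_neg hne]
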